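-- pv_equiv track=rewrite | github.com/Mjkim-Programming/PS | etc/cloud_walk.py | to_complete
-- ===== SOURCE A (Python) =====
-- def to_complete(adj):
--     adj2=[l[:] for l in adj]
--     n=len(adj2)
--     needed=[]
--     for i in range(0,n):
--         for j in range(i+1,n):
--             if j not in adj2[i]:
--                 adj2[i].append(j)
--                 adj2[j].append(i)
--                 needed.append((min(i,j),max(i,j)))
--     return needed
-- ===== SOURCE B (Python) =====
-- def to_complete(adj):
--     n = len(adj)
--     all_edges = {(i, j) for i in range(n) for j in range(i + 1, n)}
--     existing = {(i, v) for i in range(n) for v in adj[i] if i < v < n}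
--     return sorted(all_edges - existing)
-- ===== Notes on version B (the rewrite author's own statement) =====
-- stated objective: simpler
-- what changed: B builds the set of all i<j pairs and the set of edges present in adj once and returns the sorted set difference, instead of A's nested scan with list-membership tests and dead mutation of a copied adjacency list with min/max bookkeeping.
import Mathlib
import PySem

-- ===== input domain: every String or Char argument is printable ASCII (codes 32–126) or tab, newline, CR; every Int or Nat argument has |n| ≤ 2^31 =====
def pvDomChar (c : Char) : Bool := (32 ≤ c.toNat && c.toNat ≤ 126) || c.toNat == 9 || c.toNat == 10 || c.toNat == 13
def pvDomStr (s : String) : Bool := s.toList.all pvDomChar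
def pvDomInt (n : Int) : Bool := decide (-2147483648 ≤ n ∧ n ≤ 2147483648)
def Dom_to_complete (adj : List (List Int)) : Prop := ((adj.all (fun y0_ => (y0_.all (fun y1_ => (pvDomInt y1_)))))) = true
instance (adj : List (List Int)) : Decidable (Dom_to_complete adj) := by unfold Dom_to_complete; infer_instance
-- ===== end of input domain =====

-- B builds the set of all i<j pairs and the set of edges already present once and returns the
-- sorted set difference, instead of A's nested scan with mutation of a private copy of adj
-- (A's appends are invisible to the caller, so return-value equivalence is full equivalence).

-- ===== PORT A =====
-- models the mutation adj2[k].append(v): appends v to row k of the copied list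
-- (A only ever uses in-range k; out-of-range k leaves the list unchanged)
def pvApp : List (List Int) → Int → Int → List (List Int)
  | [], _, _ => []
  | r :: rs, k, v => if k = 0 then (r ++ [v]) :: rs else r :: pvApp rs (k - 1) v

-- body of the inner 'for j' loop
def innerStepA (i : Int) (st : List (List Int) × List (Int × Int)) (j : Int) :
    List (List Int) × List (Int × Int) :=
  if j ∈ PySem.List.pyGetD st.1 i [] then st
  else (pvApp (pvApp st.1 i j) j i, st.2 ++ [(min i j, max i j)])

-- body of the outer 'for i' loop
def outerStepA (n : Int) (st : List (List Int) × List (Int × Int)) (i : Int) :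
    List (List Int) × List (Int × Int) :=
  (PySem.List.pyRange (i + 1) n 1).foldl (innerStepA i) st

def to_complete (adj : List (List Int)) : List (Int × Int) :=
  let adj2 := adj.map (fun l => l)   -- [l[:] for l in adj]: per-row copy, identity on immutable lists
  let n : Int := adj2.length
  ((PySem.List.pyRange 0 n 1).foldl (outerStepA n) (adj2, ([] : List (Int × Int)))).2

-- ===== PORT B =====
-- {(i, j) for i in range(n) for j in range(i + 1, n)}
def bAllStep (n : Int) (s : PySem.Set (Int × Int)) (i : Int) : PySem.Set (Int × Int) :=
  (PySem.List.pyRange (i + 1) n 1).foldl (fun s j => PySem.Set.add s (i, j)) s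

-- {(i, v) for i in range(n) for v in adj[i] if i < v < n}
def bExStep (adj : List (List Int)) (n : Int) (s : PySem.Set (Int × Int)) (i : Int) :
    PySem.Set (Int × Int) :=
  (PySem.List.pyGetD adj i []).foldl
    (fun s v => if i < v ∧ v < n then PySem.Set.add s (i, v) else s) s

def to_complete_alt (adj : List (List Int)) : List (Int × Int) :=
  let n : Int := adj.length
  let all_edges := (PySem.List.pyRange 0 n 1).foldl (bAllStep n) PySem.Set.empty
  let existing := (PySem.List.pyRange 0 n 1).foldl (bExStep adj n) PySem.Set.empty
  PySem.List.sorted2 (PySem.Set.diff all_edges existing) Prod.fst Prod.snd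

-- ===== PRECONDITION & SPEC =====
def Spec_to_complete (adj : List (List Int)) (out : List (Int × Int)) : Prop := out = to_complete_alt adj
instance (adj : List (List Int)) (out : List (Int × Int)) : Decidable (Spec_to_complete adj out) := by unfold Spec_to_complete; infer_instance

-- ===== CLAIM (what is proved, stated in full; the proofs are below) =====
def Claim_equal_to_complete : Prop := ∀ (adj : List (List Int)), Dom_to_complete adj → Spec_to_complete adj (to_complete adj)

-- ===== LEMMAS AND PROOFS =====

-- the common normal form: all i<j<n pairs whose edge is absent from adj
def allPairs (n i0 : Int) : List (Int × Int) :=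
  (PySem.List.pyRange i0 n 1).flatMap (fun i => (PySem.List.pyRange (i + 1) n 1).map (fun j => (i, j)))

def pvPred (adj : List (List Int)) : Int × Int → Bool :=
  fun p => !decide (p.2 ∈ PySem.List.pyGetD adj p.1 [])

def missingSpec (adj : List (List Int)) : List (Int × Int) :=
  (allPairs (adj.length : Int) 0).filter (pvPred adj)

lemma allPairs_nil {n i0 : Int} (h : n ≤ i0) : allPairs n i0 = [] := by
  simp [allPairs, PySem.List.pyRange_one_eq_nil h]

lemma allPairs_cons {n i0 : Int} (h : i0 < n) :
    allPairs n i0 = (PySem.List.pyRange (i0 + 1) n 1).map (fun j => (i0, j)) ++ allPairs n (i0 + 1) := by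
  rw [allPairs, PySem.List.pyRange_one_cons h]
  simp [allPairs]

lemma mem_allPairs {n i0 : Int} {p : Int × Int} :
    p ∈ allPairs n i0 ↔ i0 ≤ p.1 ∧ p.1 < p.2 ∧ p.2 < n := by
  simp only [allPairs, List.mem_flatMap, List.mem_map, PySem.List.mem_pyRange_one]
  constructor
  · rintro ⟨i, ⟨h1, h2⟩, j, ⟨h3, h4⟩, rfl⟩; exact ⟨h1, by omega, h4⟩
  · rintro ⟨h1, h2, h3⟩; exact ⟨p.1, ⟨h1, by omega⟩, p.2, ⟨by omega, h3⟩, rfl⟩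

-- lexicographic strict order on pairs (Python's tuple <)
def lexLt (p q : Int × Int) : Prop := p.1 < q.1 ∨ (p.1 = q.1 ∧ p.2 < q.2)

lemma pairwise_allPairs_aux (n : Int) :
    ∀ (c : Nat) (i0 : Int), n ≤ i0 + c → (allPairs n i0).Pairwise lexLt := by
  intro c
  induction c with
  | zero => intro i0 h; rw [allPairs_nil (by omega)]; exact List.Pairwise.nil
  | succ c ih =>
    intro i0 h
    by_cases h0 : n ≤ i0
    · rw [allPairs_nil h0]; exact List.Pairwise.nil
    · rw [allPairs_cons (by omega), List.pairwise_append]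
      refine ⟨?_, ih (i0 + 1) (by omega), ?_⟩
      · rw [List.pairwise_map]
        exact (PySem.List.pairwise_lt_pyRange_one _ _).imp (fun hlt => Or.inr ⟨rfl, hlt⟩)
      · intro p hp q hq
        rcases List.mem_map.mp hp with ⟨j, _, rfl⟩
        have := (mem_allPairs.mp hq).1
        exact Or.inl (by simpa using by omega)

lemma pairwise_allPairs (n i0 : Int) : (allPairs n i0).Pairwise lexLt :=
  pairwise_allPairs_aux n (n - i0).toNat i0 (by omega)

lemma sorted2_eq_self (xs : List (Int × Int)) (h : xs.Pairwise lexLt) :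
    PySem.List.sorted2 xs Prod.fst Prod.snd = xs := by
  unfold PySem.List.sorted2
  simp only [if_neg (by simp : ¬(false = true))]
  induction xs using List.reverseRecOn with
  | nil => rfl
  | append_singleton ys x ih =>
    rw [List.pairwise_append] at h
    rw [List.foldl_append, List.foldl_cons, List.foldl_nil]
    rw [ih h.1]
    apply PySem.List.insertBy_of_forall_not_before
    intro y hy
    have hr : lexLt y x := h.2.2 y hy x (by simp)
    rcases hr with h1 | ⟨h1, h2⟩ <;> simp <;> omega

-- ---------- A side ----------

lemma pvApp_out : ∀ (a2 : List (List Int)) (k v : Int), (a2.length : Int) ≤ k → pvApp a2 k v = a2 := by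
  intro a2
  induction a2 with
  | nil => intro k v _; rfl
  | cons r rs ih =>
    intro k v h
    simp only [List.length_cons] at h
    rw [pvApp, if_neg (by push_cast at h; omega)]
    rw [ih (k - 1) v (by push_cast at h ⊢; omega)]

lemma pvApp_neg : ∀ (a2 : List (List Int)) (k v : Int), k < 0 → pvApp a2 k v = a2 := by
  intro a2
  induction a2 with
  | nil => intro k v _; rfl
  | cons r rs ih => intro k v h; rw [pvApp, if_neg (by omega), ih (k - 1) v (by omega)]

lemma pvApp_eq_set : ∀ (a2 : List (List Int)) (k v : Int), 0 ≤ k → k < (a2.length : Int) →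
    pvApp a2 k v = a2.set k.toNat (a2.getD k.toNat [] ++ [v]) := by
  intro a2
  induction a2 with
  | nil => intro k v h1 h2; simp at h2; omega
  | cons r rs ih =>
    intro k v h1 h2
    by_cases hk : k = 0
    · subst hk; rw [pvApp, if_pos rfl]; simp
    · rw [pvApp, if_neg hk]
      rw [ih (k - 1) v (by omega) (by simp at h2 ⊢; omega)]
      have hkn : k.toNat = (k - 1).toNat + 1 := by omega
      rw [hkn]
      simp

lemma length_pvApp (a2 : List (List Int)) (k v : Int) : (pvApp a2 k v).length = a2.length := by
  by_cases h : k < (a2.length : Int)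
  · by_cases h0 : 0 ≤ k
    · rw [pvApp_eq_set a2 k v h0 h]; simp
    · rw [pvApp_neg a2 k v (by omega)]
  · rw [pvApp_out a2 k v (by omega)]

lemma pyGetD_nonneg (xs : List (List Int)) (i : Int) (h : 0 ≤ i) :
    PySem.List.pyGetD xs i [] = xs.getD i.toNat [] := by
  simp [PySem.List.pyGetD, PySem.List.pyGet?_of_nonneg xs h, List.getD_eq_getElem?_getD]

lemma pyGetD_pvApp_self {a2 : List (List Int)} {k : Int} (v : Int) (h0 : 0 ≤ k)
    (h : k < (a2.length : Int)) :
    PySem.List.pyGetD (pvApp a2 k v) k [] = PySem.List.pyGetD a2 k [] ++ [v] := by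
  rw [pvApp_eq_set a2 k v h0 h, pyGetD_nonneg _ _ h0, pyGetD_nonneg _ _ h0]
  rw [List.getD_eq_getElem?_getD, List.getElem?_set_self (by omega)]
  simp [List.getD_eq_getElem?_getD, List.getElem?_eq_getElem (show k.toNat < a2.length by omega)]

lemma pyGetD_pvApp_ne {a2 : List (List Int)} {k m : Int} (v : Int) (h0 : 0 ≤ m) (hne : m ≠ k) :
    PySem.List.pyGetD (pvApp a2 k v) m [] = PySem.List.pyGetD a2 m [] := by
  by_cases h : 0 ≤ k ∧ k < (a2.length : Int)
  · rw [pvApp_eq_set a2 k v h.1 h.2, pyGetD_nonneg _ _ h0, pyGetD_nonneg _ _ h0]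
    rw [List.getD_eq_getElem?_getD, List.getElem?_set_ne (by omega), List.getD_eq_getElem?_getD]
  · by_cases hk : 0 ≤ k
    · rw [pvApp_out a2 k v (by omega)]
    · rw [pvApp_neg a2 k v (by omega)]

-- rows strictly above i still agree with adj on entries > i
def RowsS (adj a2 : List (List Int)) (i : Int) : Prop :=
  a2.length = adj.length ∧
  ∀ k x : Int, i < k → i < x → (x ∈ PySem.List.pyGetD a2 k [] ↔ x ∈ PySem.List.pyGetD adj k [])

-- row i agrees with adj on entries ≥ j0
def RowI (adj a2 : List (List Int)) (i j0 : Int) : Prop :=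
  ∀ j : Int, j0 ≤ j → (j ∈ PySem.List.pyGetD a2 i [] ↔ j ∈ PySem.List.pyGetD adj i [])

lemma A_inner (adj : List (List Int)) (i : Int) (hi : 0 ≤ i) (hin : i < (adj.length : Int)) :
    ∀ (c : Nat) (j0 : Int) (a2 : List (List Int)) (acc : List (Int × Int)), i < j0 →
    (adj.length : Int) ≤ j0 + c → RowsS adj a2 i → RowI adj a2 i j0 →
    ((PySem.List.pyRange j0 (adj.length : Int) 1).foldl (innerStepA i) (a2, acc)).2
        = acc ++ ((PySem.List.pyRange j0 (adj.length : Int) 1).map (fun j => (i, j))).filter (pvPred adj)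
    ∧ RowsS adj ((PySem.List.pyRange j0 (adj.length : Int) 1).foldl (innerStepA i) (a2, acc)).1 i := by
  intro c
  induction c with
  | zero =>
    intro j0 a2 acc hj0 hc hS hI
    rw [PySem.List.pyRange_one_eq_nil (by omega)]
    simpa using hS
  | succ c ih =>
    intro j0 a2 acc hj0 hc hS hI
    by_cases hn : (adj.length : Int) ≤ j0
    · rw [PySem.List.pyRange_one_eq_nil hn]; simpa using hS
    · rw [PySem.List.pyRange_one_cons (by omega), List.foldl_cons, List.map_cons]
      by_cases hmem : j0 ∈ PySem.List.pyGetD a2 i []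
      · have hstep : innerStepA i (a2, acc) j0 = (a2, acc) := by
          simp only [innerStepA]; rw [if_pos hmem]
        have hadj : j0 ∈ PySem.List.pyGetD adj i [] := (hI j0 le_rfl).mp hmem
        rw [hstep, List.filter_cons, if_neg (by simp [pvPred, hadj])]
        exact ih (j0 + 1) a2 acc (by omega) (by omega) hS (fun j hj => hI j (by omega))
      · have hadj : j0 ∉ PySem.List.pyGetD adj i [] := fun hx => hmem ((hI j0 le_rfl).mpr hx)
        have hstep : innerStepA i (a2, acc) j0
            = (pvApp (pvApp a2 i j0) j0 i, acc ++ [(i, j0)]) := by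
          simp only [innerStepA]
          rw [if_neg hmem, min_eq_left (le_of_lt hj0), max_eq_right (le_of_lt hj0)]
        have hlen : a2.length = adj.length := hS.1
        have hj0r : j0 < (a2.length : Int) := by omega
        have hrowi : PySem.List.pyGetD (pvApp (pvApp a2 i j0) j0 i) i []
            = PySem.List.pyGetD a2 i [] ++ [j0] := by
          rw [pyGetD_pvApp_ne i hi (by omega), pyGetD_pvApp_self j0 hi (by omega)]
        have hS' : RowsS adj (pvApp (pvApp a2 i j0) j0 i) i := by
          refine ⟨by rw [length_pvApp, length_pvApp, hlen], ?_⟩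
          intro k x hk hx
          by_cases hkj : k = j0
          · rw [hkj]
            rw [pyGetD_pvApp_self i (by omega) (by rw [length_pvApp]; omega),
               pyGetD_pvApp_ne j0 (by omega) (by omega)]
            simp only [List.mem_append, List.mem_singleton]
            rw [hS.2 j0 x (by omega) hx]
            constructor
            · rintro (h | rfl)
              · exact h
              · exact absurd hx (by omega)
            · exact Or.inl
          · rw [pyGetD_pvApp_ne i (by omega) hkj, pyGetD_pvApp_ne j0 (by omega) (by omega)]
            exact hS.2 k x hk hx
        have hI' : RowI adj (pvApp (pvApp a2 i j0) j0 i) i (j0 + 1) := by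
          intro x hx
          rw [hrowi]
          simp only [List.mem_append, List.mem_singleton]
          rw [hI x (by omega)]
          constructor
          · rintro (h | rfl)
            · exact h
            · exact absurd hx (by omega)
          · exact Or.inl
        obtain ⟨h1, h2⟩ := ih (j0 + 1) (pvApp (pvApp a2 i j0) j0 i) (acc ++ [(i, j0)])
          (by omega) (by omega) hS' hI'
        rw [hstep, List.filter_cons, if_pos (by simp [pvPred, hadj])]
        exact ⟨by rw [h1]; simp, h2⟩

-- rows ≥ i0 agree with adj on entries > i0
def RowsGe (adj a2 : List (List Int)) (i0 : Int) : Prop :=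
  a2.length = adj.length ∧
  ∀ k x : Int, i0 ≤ k → i0 < x → (x ∈ PySem.List.pyGetD a2 k [] ↔ x ∈ PySem.List.pyGetD adj k [])

lemma A_outer (adj : List (List Int)) :
    ∀ (c : Nat) (i0 : Int) (a2 : List (List Int)) (acc : List (Int × Int)), 0 ≤ i0 →
    (adj.length : Int) ≤ i0 + c → RowsGe adj a2 i0 →
    ((PySem.List.pyRange i0 (adj.length : Int) 1).foldl (outerStepA (adj.length : Int)) (a2, acc)).2
      = acc ++ (allPairs (adj.length : Int) i0).filter (pvPred adj) := by
  intro c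
  induction c with
  | zero =>
    intro i0 a2 acc h0 hc hG
    rw [PySem.List.pyRange_one_eq_nil (by omega), allPairs_nil (by omega)]
    simp
  | succ c ih =>
    intro i0 a2 acc h0 hc hG
    by_cases hn : (adj.length : Int) ≤ i0
    · rw [PySem.List.pyRange_one_eq_nil hn, allPairs_nil hn]; simp
    · rw [PySem.List.pyRange_one_cons (by omega), List.foldl_cons]
      obtain ⟨h1, h2⟩ := A_inner adj i0 h0 (by omega) (adj.length - i0 - 1).toNat (i0 + 1) a2 acc
        (by omega) (by omega)
        ⟨hG.1, fun k x hk hx => hG.2 k x (by omega) hx⟩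
        (fun j hj => hG.2 i0 j le_rfl (by omega))
      have hstep : outerStepA (adj.length : Int) (a2, acc) i0
          = ((PySem.List.pyRange (i0 + 1) (adj.length : Int) 1).foldl (innerStepA i0) (a2, acc)) := rfl
      set st := (PySem.List.pyRange (i0 + 1) (adj.length : Int) 1).foldl (innerStepA i0) (a2, acc) with hst
      have hG' : RowsGe adj st.1 (i0 + 1) :=
        ⟨h2.1, fun k x hk hx => h2.2 k x (by omega) (by omega)⟩
      have hrec := ih (i0 + 1) st.1 st.2 (by omega) (by omega) hG'
      rw [hstep]
      calc ((PySem.List.pyRange (i0 + 1) (adj.length : Int) 1).foldl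
              (outerStepA (adj.length : Int)) st).2
          = st.2 ++ (allPairs (adj.length : Int) (i0 + 1)).filter (pvPred adj) := hrec
        _ = acc ++ ((PySem.List.pyRange (i0 + 1) (adj.length : Int) 1).map (fun j => (i0, j))).filter (pvPred adj)
              ++ (allPairs (adj.length : Int) (i0 + 1)).filter (pvPred adj) := by
            rw [h1]
        _ = acc ++ (allPairs (adj.length : Int) i0).filter (pvPred adj) := by
            rw [allPairs_cons (n := (adj.length : Int)) (i0 := i0) (by omega), List.filter_append,
              List.append_assoc]

lemma A_eq_missingSpec (adj : List (List Int)) : to_complete adj = missingSpec adj := by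
  simp only [to_complete, List.map_id']
  rw [A_outer adj adj.length 0 adj [] le_rfl (by omega) ⟨rfl, fun _ _ _ _ => Iff.rfl⟩]
  simp [missingSpec]

-- ---------- B side ----------

lemma add_of_not_mem {s : PySem.Set (Int × Int)} {p : Int × Int} (h : p ∉ s) :
    PySem.Set.add s p = s ++ [p] := by
  rw [PySem.Set.add, if_neg]
  simpa using h

lemma B_all_inner (n i0 : Int) :
    ∀ (c : Nat) (j0 : Int) (s : PySem.Set (Int × Int)), n ≤ j0 + c →
    (∀ j : Int, j0 ≤ j → (i0, j) ∉ s) →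
    (PySem.List.pyRange j0 n 1).foldl (fun s j => PySem.Set.add s (i0, j)) s
      = s ++ (PySem.List.pyRange j0 n 1).map (fun j => (i0, j)) := by
  intro c
  induction c with
  | zero => intro j0 s h _; rw [PySem.List.pyRange_one_eq_nil (by omega)]; simp
  | succ c ih =>
    intro j0 s h hs
    by_cases h0 : n ≤ j0
    · rw [PySem.List.pyRange_one_eq_nil h0]; simp
    · rw [PySem.List.pyRange_one_cons (by omega), List.foldl_cons, List.map_cons]
      rw [add_of_not_mem (hs j0 le_rfl)]
      rw [ih (j0 + 1) (s ++ [(i0, j0)]) (by omega) ?_]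
      · simp
      · intro j hj
        simp only [List.mem_append, List.mem_singleton, Prod.mk.injEq]
        rintro (hmem | ⟨-, rfl⟩)
        · exact hs j (by omega) hmem
        · omega

lemma B_all (n : Int) :
    ∀ (c : Nat) (i0 : Int) (s : PySem.Set (Int × Int)), n ≤ i0 + c →
    (∀ p : Int × Int, p ∈ s → p.1 < i0) →
    (PySem.List.pyRange i0 n 1).foldl (bAllStep n) s = s ++ allPairs n i0 := by
  intro c
  induction c with
  | zero => intro i0 s h _; rw [PySem.List.pyRange_one_eq_nil (by omega), allPairs_nil (by omega)]; simp
  | succ c ih =>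
    intro i0 s h hs
    by_cases h0 : n ≤ i0
    · rw [PySem.List.pyRange_one_eq_nil h0, allPairs_nil h0]; simp
    · rw [PySem.List.pyRange_one_cons (by omega), List.foldl_cons, allPairs_cons (by omega)]
      rw [show bAllStep n s i0 = s ++ (PySem.List.pyRange (i0 + 1) n 1).map (fun j => (i0, j)) from
        B_all_inner n i0 (n - i0 - 1).toNat (i0 + 1) s (by omega)
          (fun j _ hmem => by have := hs _ hmem; simp at this)]
      rw [ih (i0 + 1) _ (by omega) ?_]
      · simp
      · intro p hp
        rcases List.mem_append.mp hp with hmem | hmem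
        · have := hs _ hmem; omega
        · rcases List.mem_map.mp hmem with ⟨j, _, rfl⟩; simp

lemma mem_foldl_iff {α β : Type} (l : List α) (step : List β → α → List β) (Q : α → β → Prop)
    (h : ∀ (s : List β) (x : α) (p : β), p ∈ step s x ↔ p ∈ s ∨ Q x p) :
    ∀ (s : List β) (p : β), p ∈ l.foldl step s ↔ p ∈ s ∨ ∃ x ∈ l, Q x p := by
  induction l with
  | nil => intro s p; simp
  | cons x l ih =>
    intro s p
    rw [List.foldl_cons, ih (step s x) p, h s x p]
    simp only [List.mem_cons]
    constructor
    · rintro ((hp | hq) | ⟨y, hy, hQ⟩)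
      · exact Or.inl hp
      · exact Or.inr ⟨x, Or.inl rfl, hq⟩
      · exact Or.inr ⟨y, Or.inr hy, hQ⟩
    · rintro (hp | ⟨y, (rfl | hy), hQ⟩)
      · exact Or.inl (Or.inl hp)
      · exact Or.inl (Or.inr hQ)
      · exact Or.inr ⟨y, hy, hQ⟩

lemma mem_existing (adj : List (List Int)) {p : Int × Int} :
    p ∈ (PySem.List.pyRange 0 (adj.length : Int) 1).foldl (bExStep adj (adj.length : Int)) PySem.Set.empty
      ↔ ∃ i : Int, (0 ≤ i ∧ i < (adj.length : Int)) ∧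
          ∃ v ∈ PySem.List.pyGetD adj i [], (i < v ∧ v < (adj.length : Int)) ∧ p = (i, v) := by
  rw [mem_foldl_iff _ _ (fun i q => ∃ v ∈ PySem.List.pyGetD adj i [],
        (i < v ∧ v < (adj.length : Int)) ∧ q = (i, v)) ?hstep PySem.Set.empty p]
  · simp only [PySem.List.mem_pyRange_one]
    constructor
    · rintro (habs | hex)
      · simp [PySem.Set.empty] at habs
      · exact hex
    · exact Or.inr
  case hstep =>
    intro s i q
    rw [bExStep, mem_foldl_iff _ _ (fun v r => (i < v ∧ v < (adj.length : Int)) ∧ r = (i, v)) ?_ s q]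
    intro s' v r
    by_cases hc : i < v ∧ v < (adj.length : Int)
    · rw [if_pos hc, PySem.Set.mem_add]
      constructor
      · rintro (h | rfl)
        · exact Or.inl h
        · exact Or.inr ⟨hc, rfl⟩
      · rintro (h | ⟨-, rfl⟩)
        · exact Or.inl h
        · exact Or.inr rfl
    · rw [if_neg hc]
      constructor
      · exact Or.inl
      · rintro (h | ⟨hc', -⟩)
        · exact h
        · exact absurd hc' hc

lemma B_eq_missingSpec (adj : List (List Int)) : to_complete_alt adj = missingSpec adj := by
  simp only [to_complete_alt]
  rw [B_all (adj.length : Int) adj.length 0 PySem.Set.empty (by omega)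
      (by intro p hp; simp [PySem.Set.empty] at hp)]
  rw [show (PySem.Set.empty : PySem.Set (Int × Int)) ++ allPairs (adj.length : Int) 0
      = allPairs (adj.length : Int) 0 from List.nil_append _]
  rw [show PySem.Set.diff (allPairs (adj.length : Int) 0)
        ((PySem.List.pyRange 0 (adj.length : Int) 1).foldl (bExStep adj (adj.length : Int)) PySem.Set.empty)
      = (allPairs (adj.length : Int) 0).filter
          (fun p => !((PySem.List.pyRange 0 (adj.length : Int) 1).foldl
              (bExStep adj (adj.length : Int)) PySem.Set.empty).contains p) from rfl]
  rw [List.filter_congr ?hcong]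
  · exact sorted2_eq_self _ ((pairwise_allPairs _ _).sublist List.filter_sublist)
  case hcong =>
    intro p hp
    rw [mem_allPairs] at hp
    have hiff : p ∈ (PySem.List.pyRange 0 (adj.length : Int) 1).foldl
        (bExStep adj (adj.length : Int)) ([] : PySem.Set (Int × Int)) ↔ p.2 ∈ PySem.List.pyGetD adj p.1 [] := by
      show p ∈ (PySem.List.pyRange 0 (adj.length : Int) 1).foldl
        (bExStep adj (adj.length : Int)) PySem.Set.empty ↔ _
      rw [mem_existing]
      constructor
      · rintro ⟨i, -, v, hv, -, rfl⟩; exact hv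
      · intro hv
        exact ⟨p.1, ⟨by omega, by omega⟩, p.2, hv, ⟨by omega, by omega⟩, rfl⟩
    simp [pvPred, hiff]

-- ===== VERDICT (by name: the statement is the Claim_ definition above) =====
theorem to_complete_spec : Claim_equal_to_complete := by
  intro adj _
  unfold Spec_to_complete
  rw [A_eq_missingSpec, B_eq_missingSpec]
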